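-- pv_equiv track=rewrite | github.com/sweemeng/advent_of_code_2020 | 9/solution.py | process
-- ===== SOURCE A (Python) =====
-- def process(data, pos, window_size):
--     end = pos
--     start = end - window_size
--     window = data[start:end]
--     for i in window:
--         temp = data[pos] - i
--         if temp in window:
--             return True
--     return False
-- ===== SOURCE B (Python) =====
-- def process(data, pos, window_size):
--     w = sorted(data[pos - window_size:pos])
--     if not w:
--         return False
--     target = data[pos]
--     l, r = 0, len(w) - 1
--     while l <= r:
--         s = w[l] + w[r]
--         if s == target:
--             return True
--         if s < target:
--             l += 1
--         else:
--             r -= 1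
--     return False
-- ===== Notes on version B (the rewrite author's own statement) =====
-- stated objective: alternative
-- what changed: Replaces A's per-element linear membership scan of the window with sorting the window once and a two-pointer sweep (l<=r so a self-pairing target==2*x is still found).
import Mathlib
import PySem

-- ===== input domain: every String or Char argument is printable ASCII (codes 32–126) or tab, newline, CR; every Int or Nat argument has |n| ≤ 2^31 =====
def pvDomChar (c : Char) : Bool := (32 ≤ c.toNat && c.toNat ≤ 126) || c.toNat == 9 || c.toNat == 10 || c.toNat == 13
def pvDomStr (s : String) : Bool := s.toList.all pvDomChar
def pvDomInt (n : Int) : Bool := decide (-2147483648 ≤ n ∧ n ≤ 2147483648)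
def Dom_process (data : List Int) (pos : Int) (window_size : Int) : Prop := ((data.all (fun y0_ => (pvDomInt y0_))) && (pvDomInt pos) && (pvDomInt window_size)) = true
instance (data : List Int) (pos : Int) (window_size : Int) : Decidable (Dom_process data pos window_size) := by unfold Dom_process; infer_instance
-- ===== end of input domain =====

-- B sorts the window once and uses a two-pointer sweep (l<=r) instead of A's per-element membership scan (alternative decomposition).

-- ===== PORT A =====
-- 'for i in window: temp = data[pos] - i; if temp in window: return True'; data[pos] raising = pyGet? none (excluded by Pre_)
def processLoopA (data : List Int) (pos : Int) (window : List Int) : List Int → Bool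
  | [] => false
  | i :: rest =>
    match PySem.List.pyGet? data pos with
    | none => false
    | some dp => if (dp - i) ∈ window then true else processLoopA data pos window rest

def process (data : List Int) (pos : Int) (window_size : Int) : Bool :=
  let window := PySem.List.slice data (some (pos - window_size)) (some pos)
  processLoopA data pos window window

-- ===== PORT B =====
-- the 'while l <= r' two-pointer loop of Source B; indices stay in [0, len w) whenever entered with 0 ≤ l ≤ r < len w
def processTp (w : List Int) (t : Int) (l r : Int) : Bool :=
  if l ≤ r then
    let s := PySem.List.pyGetD w l 0 + PySem.List.pyGetD w r 0
    if s = t then true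
    else if s < t then processTp w t (l + 1) r
    else processTp w t l (r - 1)
  else false
termination_by (r + 1 - l).toNat
decreasing_by all_goals (simp at *; omega)

def process_alt (data : List Int) (pos : Int) (window_size : Int) : Bool :=
  let w := PySem.List.sorted (PySem.List.slice data (some (pos - window_size)) (some pos)) (fun x => x) false
  if w = [] then false
  else
    match PySem.List.pyGet? data pos with
    | none => false
    | some t => processTp w t 0 (PySem.List.len w - 1)

-- ===== PRECONDITION & SPEC =====
-- Pre_ excludes exactly the inputs where A raises IndexError: a nonempty window but pos out of data's index range.
def Pre_process (data : List Int) (pos : Int) (window_size : Int) : Prop :=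
  PySem.List.slice data (some (pos - window_size)) (some pos) ≠ [] → PySem.Raise.InRange data.length pos

instance (data : List Int) (pos : Int) (window_size : Int) : Decidable (Pre_process data pos window_size) := by
  unfold Pre_process; infer_instance

def pvWitness_process : List Int × Int × Int := ([1, 2, 3], 2, 2)

def Spec_process (data : List Int) (pos : Int) (window_size : Int) (out : Bool) : Prop := out = process_alt data pos window_size
instance (data : List Int) (pos : Int) (window_size : Int) (out : Bool) : Decidable (Spec_process data pos window_size out) := by unfold Spec_process; infer_instance

-- ===== CLAIM (what is proved, stated in full; the proofs are below) =====
def Claim_equal_process : Prop := ∀ (data : List Int) (pos : Int) (window_size : Int), Dom_process data pos window_size → Pre_process data pos window_size → Spec_process data pos window_size (process data pos window_size)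

-- ===== LEMMAS AND PROOFS =====

-- A's loop succeeds iff some window element pairs with another (possibly itself) to the target
theorem processLoopA_iff (data : List Int) (pos : Int) (window : List Int) (dp : Int)
    (h : PySem.List.pyGet? data pos = some dp) (l : List Int) :
    processLoopA data pos window l = true ↔ ∃ i ∈ l, (dp - i) ∈ window := by
  induction l with
  | nil => simp [processLoopA]
  | cons x rest ih =>
    simp only [processLoopA, h]
    by_cases hx : (dp - x) ∈ window
    · simp [hx]
    · simp [hx, ih]

theorem sorted_getD_mono {w : List Int} (hs : w.Pairwise (· ≤ ·)) {i j : Nat}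
    (hij : i ≤ j) (hj : j < w.length) : w.getD i 0 ≤ w.getD j 0 := by
  rcases Nat.lt_or_ge i j with hlt | hge
  · have := (List.pairwise_iff_getElem.mp hs) i j (by omega) hj hlt
    rw [List.getD_eq_getElem _ _ (by omega), List.getD_eq_getElem _ _ hj]
    exact this
  · have : i = j := by omega
    subst this; exact le_refl _

-- two-pointer correctness on a sorted list
theorem processTp_iff (w : List Int) (hs : w.Pairwise (· ≤ ·)) (t : Int) :
    ∀ (n : Nat) (l r : Int), (r + 1 - l).toNat ≤ n → 0 ≤ l → r < (w.length : Int) →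
    (processTp w t l r = true ↔
      ∃ i j : Nat, l ≤ (i : Int) ∧ i ≤ j ∧ (j : Int) ≤ r ∧ w.getD i 0 + w.getD j 0 = t) := by
  intro n
  induction n with
  | zero =>
    intro l r hn hl hr
    have hlr : ¬ l ≤ r := by omega
    rw [processTp]
    simp only [hlr, if_false]
    constructor
    · intro h; exact absurd h (by simp)
    · rintro ⟨i, j, h1, h2, h3, _⟩
      exfalso; omega
  | succ n ih =>
    intro l r hn hl hr
    by_cases hlr : l ≤ r
    · have hrnn : 0 ≤ r := le_trans hl hlr
      have hlk : l.toNat < w.length := by omega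
      have hrk : r.toNat < w.length := by omega
      have hlv : PySem.List.pyGetD w l 0 = w.getD l.toNat 0 := by
        rw [PySem.List.pyGetD_eq_getElem w 0 hl (by omega), List.getD_eq_getElem _ _ hlk]
      have hrv : PySem.List.pyGetD w r 0 = w.getD r.toNat 0 := by
        rw [PySem.List.pyGetD_eq_getElem w 0 hrnn hr, List.getD_eq_getElem _ _ hrk]
      rw [processTp]
      simp only [hlr, if_true, hlv, hrv]
      set s := w.getD l.toNat 0 + w.getD r.toNat 0 with hsdef
      by_cases hst : s = t
      · rw [if_pos hst]
        constructor
        · intro _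
          exact ⟨l.toNat, r.toNat, by omega, by omega, by omega, hst⟩
        · intro _; rfl
      · simp only [if_neg hst]
        by_cases hlt : s < t
        · simp only [if_pos hlt]
          rw [ih (l + 1) r (by omega) (by omega) hr]
          constructor
          · rintro ⟨i, j, h1, h2, h3, h4⟩; exact ⟨i, j, by omega, h2, h3, h4⟩
          · rintro ⟨i, j, h1, h2, h3, h4⟩
            refine ⟨i, j, ?_, h2, h3, h4⟩
            by_contra hcon
            have hie : (i : Int) = l := by omega
            have hik : i = l.toNat := by omega
            have hjr : w.getD j 0 ≤ w.getD r.toNat 0 :=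
              sorted_getD_mono hs (by omega) hrk
            have : w.getD i 0 + w.getD j 0 ≤ s := by
              rw [hik]; omega
            omega
        · simp only [if_neg hlt]
          rw [ih l (r - 1) (by omega) hl (by omega)]
          constructor
          · rintro ⟨i, j, h1, h2, h3, h4⟩; exact ⟨i, j, h1, h2, by omega, h4⟩
          · rintro ⟨i, j, h1, h2, h3, h4⟩
            refine ⟨i, j, h1, h2, ?_, h4⟩
            by_contra hcon
            have hjk : j = r.toNat := by omega
            have hil : w.getD l.toNat 0 ≤ w.getD i 0 :=
              sorted_getD_mono hs (by omega) (by omega)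
            have : s ≤ w.getD i 0 + w.getD j 0 := by
              rw [hjk]; omega
            omega
    · rw [processTp]
      simp only [hlr, if_false]
      constructor
      · intro h; exact absurd h (by simp)
      · rintro ⟨i, j, h1, h2, h3, _⟩; exfalso; omega

-- pair-of-indices form ↔ pair-of-members form, for a nonempty list
theorem pairs_iff_members (w : List Int) (_hne : w ≠ []) (t : Int) :
    (∃ i j : Nat, (0 : Int) ≤ (i : Int) ∧ i ≤ j ∧ (j : Int) ≤ (w.length : Int) - 1 ∧ w.getD i 0 + w.getD j 0 = t)
      ↔ ∃ a ∈ w, ∃ b ∈ w, a + b = t := by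
  constructor
  · rintro ⟨i, j, _, hij, hj, hsum⟩
    have hjlt : j < w.length := by omega
    have hilt : i < w.length := by omega
    refine ⟨w[i], List.getElem_mem _, w[j], List.getElem_mem _, ?_⟩
    rwa [List.getD_eq_getElem _ _ hilt, List.getD_eq_getElem _ _ hjlt] at hsum
  · rintro ⟨a, ha, b, hb, hab⟩
    obtain ⟨ia, hia, hav⟩ := List.getElem_of_mem ha
    obtain ⟨ib, hib, hbv⟩ := List.getElem_of_mem hb
    rcases Nat.le_total ia ib with hle | hle
    · exact ⟨ia, ib, by omega, hle, by omega, by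
        rw [List.getD_eq_getElem _ _ hia, List.getD_eq_getElem _ _ hib, hav, hbv]; exact hab⟩
    · exact ⟨ib, ia, by omega, hle, by omega, by
        rw [List.getD_eq_getElem _ _ hib, List.getD_eq_getElem _ _ hia, hbv, hav]
        rw [Int.add_comm]; exact hab⟩

-- A's success condition in member-pair form
theorem memberA_iff (W : List Int) (t : Int) :
    (∃ i ∈ W, (t - i) ∈ W) ↔ ∃ a ∈ W, ∃ b ∈ W, a + b = t := by
  constructor
  · rintro ⟨i, hi, hti⟩
    exact ⟨i, hi, t - i, hti, by ring⟩
  · rintro ⟨a, ha, b, hb, hab⟩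
    exact ⟨a, ha, by rw [show t - a = b by omega]; exact hb⟩

-- ===== VERDICT (by name: the statement is the Claim_ definition above) =====
theorem process_spec : Claim_equal_process := by
  intro data pos window_size _hdom hpre
  unfold Spec_process process process_alt
  set W := PySem.List.slice data (some (pos - window_size)) (some pos) with hW
  by_cases hWe : W = []
  · simp only [hWe]
    rw [if_pos (by simp [PySem.List.sorted_eq_nil_iff])]
    simp [processLoopA]
  · obtain ⟨dp, hdp⟩ : ∃ dp, PySem.List.pyGet? data pos = some dp := by
      have hin := hpre hWe
      cases hget : PySem.List.pyGet? data pos with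
      | none => exact absurd hin (by rwa [← PySem.List.pyGet?_eq_none_iff] )
      | some v => exact ⟨v, rfl⟩
    set w := PySem.List.sorted W (fun x => x) false with hwdef
    have hwne : w ≠ [] := by
      rw [hwdef, Ne, PySem.List.sorted_eq_nil_iff]; exact hWe
    have hwperm : w.Perm W := PySem.List.sorted_perm W (fun x => x) false
    have hwpair : w.Pairwise (· ≤ ·) := by simpa using PySem.List.sorted_pairwise W (fun x => x)
    have hwlen : 0 < w.length := List.length_pos_iff.mpr hwne
    simp only [if_neg hwne, hdp]
    have hA := processLoopA_iff data pos W dp hdp W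
    have hlen : PySem.List.len w = (w.length : Int) := PySem.List.len_eq w
    have hB := processTp_iff w hwpair dp ((w.length : Int) - 1 + 1 - 0).toNat 0 ((w.length : Int) - 1)
      (le_refl _) (le_refl _) (by omega)
    have key : processLoopA data pos W W = processTp w dp 0 (PySem.List.len w - 1) := by
      rw [hlen]
      cases hAv : processLoopA data pos W W <;> cases hBv : processTp w dp 0 ((w.length : Int) - 1)
      · rfl
      · exfalso
        have hmem := (pairs_iff_members w hwne dp).mp (hB.mp hBv)
        have hmem' : ∃ a ∈ W, ∃ b ∈ W, a + b = dp := by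
          obtain ⟨a, ha, b, hb, hab⟩ := hmem
          exact ⟨a, hwperm.mem_iff.mp ha, b, hwperm.mem_iff.mp hb, hab⟩
        have := hA.mpr ((memberA_iff W dp).mpr hmem')
        rw [hAv] at this; exact absurd this (by simp)
      · exfalso
        have hmem' := (memberA_iff W dp).mp (hA.mp hAv)
        have hmem : ∃ a ∈ w, ∃ b ∈ w, a + b = dp := by
          obtain ⟨a, ha, b, hb, hab⟩ := hmem'
          exact ⟨a, hwperm.mem_iff.mpr ha, b, hwperm.mem_iff.mpr hb, hab⟩
        have := hB.mpr ((pairs_iff_members w hwne dp).mpr hmem)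
        rw [hBv] at this; exact absurd this (by simp)
      · rfl
    exact key
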